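-- pv_equiv track=rewrite | github.com/MartinOstios/competitive-programming | isACat.py | isACat
-- ===== SOURCE A (Python) =====
-- meow = ["\o", "m", "e", "o", "w", "\o"]
--
-- def isACat(s, n):
--     if n < 4: return False
--     s = s.lower()
--     k = 0
--     for n in s:
--         if n != meow[k]:
--             if n == meow[k+1]:
--                 k += 1
--             else:
--                 return False
--     return k==4
-- ===== SOURCE B (Python) =====
-- from itertools import groupby
--
-- def isACat(s, n):
--     return n >= 4 and [c for c, _ in groupby(s.lower())] == ['m', 'e', 'o', 'w']
-- ===== Notes on version B (the rewrite author's own statement) =====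
-- stated objective: simpler
-- what changed: Replaces the character-by-character advancing state machine over the sentinel-padded meow table by a run-collapse (groupby keys of s.lower()) compared to ['m','e','o','w'], gated by n >= 4.
import Mathlib
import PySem

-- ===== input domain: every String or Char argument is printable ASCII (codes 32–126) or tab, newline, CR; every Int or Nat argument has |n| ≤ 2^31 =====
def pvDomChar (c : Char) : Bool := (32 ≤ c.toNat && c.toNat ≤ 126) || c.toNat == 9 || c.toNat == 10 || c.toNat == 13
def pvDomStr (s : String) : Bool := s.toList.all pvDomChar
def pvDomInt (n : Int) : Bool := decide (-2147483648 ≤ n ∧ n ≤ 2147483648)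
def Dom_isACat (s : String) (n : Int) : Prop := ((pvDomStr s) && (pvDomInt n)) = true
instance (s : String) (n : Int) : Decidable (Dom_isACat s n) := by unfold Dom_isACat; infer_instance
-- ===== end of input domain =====

-- B replaces A's char-by-char advancing state machine over the sentinel-padded table by
-- "collapse runs, compare the run-key list to ['m','e','o','w']" (objective: simpler).

-- ===== PORT A =====
-- module-level constant 'meow' ("\o" is the two-character string backslash-o)
def pvMeow : List String := ["\\o", "m", "e", "o", "w", "\\o"]

-- the 'for n in s' loop over the lowered string: state k;
-- returns none where A returns False from inside the loop
def isACatLoop : List Char → Nat → Option Nat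
  | [], k => some k
  | c :: cs, k =>
    if String.ofList [c] ≠ pvMeow.getD k "" then
      if String.ofList [c] = pvMeow.getD (k + 1) "" then isACatLoop cs (k + 1)
      else none
    else isACatLoop cs k

def isACat (s : String) (n : Int) : Bool :=
  if n < 4 then false
  else
    match isACatLoop (PySem.Str.lower s).toList 0 with
    | none => false
    | some k => k == 4

-- ===== PORT B =====
-- itertools.groupby keys: first element, then each element differing from the previous one
def pvDedupFrom (p : Char) : List Char → List Char
  | [] => []
  | c :: cs => if c = p then pvDedupFrom p cs else c :: pvDedupFrom c cs

def pvGroupKeys : List Char → List Char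
  | [] => []
  | c :: cs => c :: pvDedupFrom c cs

def isACat_alt (s : String) (n : Int) : Bool :=
  decide (4 ≤ n) && (pvGroupKeys (PySem.Str.lower s).toList == ['m', 'e', 'o', 'w'])

-- ===== PRECONDITION & SPEC =====
def Spec_isACat (s : String) (n : Int) (out : Bool) : Prop := out = isACat_alt s n
instance (s : String) (n : Int) (out : Bool) : Decidable (Spec_isACat s n out) := by unfold Spec_isACat; infer_instance

-- ===== CLAIM (what is proved, stated in full; the proofs are below) =====
def Claim_equal_isACat : Prop := ∀ (s : String) (n : Int), Dom_isACat s n → Spec_isACat s n (isACat s n)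

-- ===== LEMMAS AND PROOFS =====

-- the expected previous character when the machine is in state k ∈ [1,4]
def chKey : Nat → Char
  | 1 => 'm'
  | 2 => 'e'
  | 3 => 'o'
  | _ => 'w'

theorem eq_lit_m (c : Char) : (String.ofList [c] = "m") ↔ c = 'm' := by
  constructor
  · intro h; have := congrArg String.toList h; simpa using this
  · intro h; rw [h]

theorem eq_lit_e (c : Char) : (String.ofList [c] = "e") ↔ c = 'e' := by
  constructor
  · intro h; have := congrArg String.toList h; simpa using this
  · intro h; rw [h]

theorem eq_lit_o (c : Char) : (String.ofList [c] = "o") ↔ c = 'o' := by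
  constructor
  · intro h; have := congrArg String.toList h; simpa using this
  · intro h; rw [h]

theorem eq_lit_w (c : Char) : (String.ofList [c] = "w") ↔ c = 'w' := by
  constructor
  · intro h; have := congrArg String.toList h; simpa using this
  · intro h; rw [h]

-- a one-character string never equals the two-character sentinel "\o"
theorem ne_sent (c : Char) : (String.ofList [c] = "\\o") ↔ False := by
  constructor
  · intro h; have := congrArg String.toList h; simp at this
  · intro h; exact h.elim

-- the state machine from state k ∈ [1,4] accepts exactly when the remaining run keys,
-- relative to previous character chKey k, are the remaining letters of "meow"
theorem loop_keys (l : List Char) : ∀ k : Nat, 1 ≤ k → k ≤ 4 →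
    (match isACatLoop l k with | none => false | some j => j == 4)
      = (pvDedupFrom (chKey k) l == List.drop k ['m', 'e', 'o', 'w']) := by
  induction l with
  | nil =>
    intro k h1 h4
    interval_cases k <;> simp [isACatLoop, pvDedupFrom]
  | cons c cs ih =>
    intro k h1 h4
    interval_cases k
    · -- k = 1
      by_cases h : c = 'm'
      · subst h
        simpa [isACatLoop, pvMeow, eq_lit_m, pvDedupFrom, chKey] using ih 1 (by omega) (by omega)
      · by_cases h2 : c = 'e'
        · subst h2
          simpa [isACatLoop, pvMeow, eq_lit_m, eq_lit_e, pvDedupFrom, chKey]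
            using ih 2 (by omega) (by omega)
        · simp [isACatLoop, pvMeow, eq_lit_m, eq_lit_e, pvDedupFrom, chKey, h, h2]
    · -- k = 2
      by_cases h : c = 'e'
      · subst h
        simpa [isACatLoop, pvMeow, eq_lit_e, pvDedupFrom, chKey] using ih 2 (by omega) (by omega)
      · by_cases h2 : c = 'o'
        · subst h2
          simpa [isACatLoop, pvMeow, eq_lit_e, eq_lit_o, pvDedupFrom, chKey]
            using ih 3 (by omega) (by omega)
        · simp [isACatLoop, pvMeow, eq_lit_e, eq_lit_o, pvDedupFrom, chKey, h, h2]
    · -- k = 3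
      by_cases h : c = 'o'
      · subst h
        simpa [isACatLoop, pvMeow, eq_lit_o, pvDedupFrom, chKey] using ih 3 (by omega) (by omega)
      · by_cases h2 : c = 'w'
        · subst h2
          simpa [isACatLoop, pvMeow, eq_lit_o, eq_lit_w, pvDedupFrom, chKey]
            using ih 4 (by omega) (by omega)
        · simp [isACatLoop, pvMeow, eq_lit_o, eq_lit_w, pvDedupFrom, chKey, h, h2]
    · -- k = 4
      by_cases h : c = 'w'
      · subst h
        simpa [isACatLoop, pvMeow, eq_lit_w, pvDedupFrom, chKey] using ih 4 (by omega) (by omega)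
      · simp [isACatLoop, pvMeow, eq_lit_w, ne_sent, pvDedupFrom, chKey, h]

-- ===== VERDICT (by name: the statement is the Claim_ definition above) =====
theorem isACat_spec : Claim_equal_isACat := by
  intro s n _
  unfold Spec_isACat isACat isACat_alt
  by_cases hn : n < 4
  · simp [hn, show ¬ (4 ≤ n) by omega]
  · simp only [if_neg hn, show (4 ≤ n) by omega, decide_true, Bool.true_and]
    cases hl : (PySem.Str.lower s).toList with
    | nil => simp [isACatLoop, pvGroupKeys]
    | cons c cs =>
      by_cases hc : c = 'm'
      · subst hc
        simpa [isACatLoop, pvMeow, eq_lit_m, ne_sent, pvGroupKeys, pvDedupFrom, chKey]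
          using loop_keys cs 1 (by omega) (by omega)
      · simp [isACatLoop, pvMeow, eq_lit_m, ne_sent, pvGroupKeys, hc]
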